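-- pv_equiv track=rewrite | github.com/Julian-Moncarz/ProctorAI | src/user_interface.py | split_text_into_parts
-- ===== SOURCE A (Python) =====
-- def split_text_into_parts(text):
--     parts = []
--     temp = ""
--     in_tag = False
--
--     for char in text:
--         if char == '<':
--             if temp:
--                 parts.append(('text', temp.strip()))
--                 temp = ""
--             in_tag = True
--             temp += char
--         elif char == '>':
--             temp += char
--             parts.append(('tag', temp))
--             temp = ""
--             in_tag = False
--         else:
--             temp += char
--
--     if temp:
--         parts.append(('text', temp.strip()))
--
--     return parts
-- ===== SOURCE B (Python) =====
-- def split_text_into_parts(text):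
--     # Tokenize into maximal chunks first, then classify each chunk in one pass.
--     # A chunk is either a lone '>' , or a run of non-'<'/'>' characters
--     # (optionally starting at a '<') with a terminating '>' absorbed into it.
--     n = len(text)
--     tokens = []
--     i = 0
--     while i < n:
--         if text[i] == '>':
--             j = i + 1
--         else:
--             j = i + 1
--             while j < n and text[j] != '<' and text[j] != '>':
--                 j += 1
--             if j < n and text[j] == '>':
--                 j += 1
--         tokens.append(text[i:j])
--         i = j
--     return [('tag', t) if t.endswith('>') else ('text', t.strip()) for t in tokens]
-- ===== Notes on version B (the rewrite author's own statement) =====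
-- stated objective: alternative
-- what changed: Replaces the character-by-character accumulator state machine with a two-phase tokenizer: first cut the text into maximal chunk spans (a lone '>', or a run up to the next '<'/'>' with a terminating '>' absorbed), then classify each chunk as tag/text in a single comprehension.
import Mathlib
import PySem

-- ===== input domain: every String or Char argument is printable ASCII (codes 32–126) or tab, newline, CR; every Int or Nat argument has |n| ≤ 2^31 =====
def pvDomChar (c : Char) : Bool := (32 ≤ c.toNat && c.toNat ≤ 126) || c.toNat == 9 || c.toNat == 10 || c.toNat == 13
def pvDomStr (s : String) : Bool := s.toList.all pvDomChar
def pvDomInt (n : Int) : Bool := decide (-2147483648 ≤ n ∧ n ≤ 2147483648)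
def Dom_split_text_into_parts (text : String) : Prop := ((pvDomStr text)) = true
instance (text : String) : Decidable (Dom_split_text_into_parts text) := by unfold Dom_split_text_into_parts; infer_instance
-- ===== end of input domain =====

-- B re-implements A as tokenize-into-chunks + classification pass (objective: alternative; same cost).

-- ===== PORT A =====
-- one step of A's for-loop; state = (parts, temp, in_tag)
def pvStepA (st : List (String × String) × String × Bool) (c : Char) :
    List (String × String) × String × Bool :=
  if c = '<' then
    let res := if st.2.1 ≠ "" then (st.1 ++ [("text", PySem.Str.strip st.2.1)], "") else (st.1, st.2.1)
    (res.1, res.2.push c, true)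
  else if c = '>' then
    (st.1 ++ [("tag", st.2.1.push c)], "", false)
  else
    (st.1, st.2.1.push c, st.2.2)

def split_text_into_parts (text : String) : List (String × String) :=
  let fin := text.toList.foldl pvStepA ([], "", false)
  if fin.2.1 ≠ "" then fin.1 ++ [("text", PySem.Str.strip fin.2.1)] else fin.1

-- ===== PORT B =====
-- Source B's inner while loop: the maximal run of characters that are neither '<' nor '>'
def pvTakeRun : List Char → List Char × List Char
  | [] => ([], [])
  | c :: cs =>
    if c = '<' ∨ c = '>' then ([], c :: cs)
    else
      let p := pvTakeRun cs
      (c :: p.1, p.2)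

theorem pvTakeRun_len (cs : List Char) : (pvTakeRun cs).2.length ≤ cs.length := by
  induction cs with
  | nil => simp [pvTakeRun]
  | cons c cs ih =>
    simp only [pvTakeRun]
    split
    · simp
    · simpa using Nat.le_succ_of_le ih

-- Source B's outer while loop, as recursion over the remaining characters;
-- `if j < n and text[j] == '>': j += 1` is the head? test on the rest of the run
def pvTokenize : List Char → List String
  | [] => []
  | c :: cs =>
    if c = '>' then ">" :: pvTokenize cs
    else
      let p := pvTakeRun cs
      if p.2.head? = some '>' then
        String.ofList (c :: p.1 ++ ['>']) :: pvTokenize p.2.tail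
      else
        String.ofList (c :: p.1) :: pvTokenize p.2
  termination_by cs => cs.length
  decreasing_by
    · simp
    · have h1 := pvTakeRun_len cs
      have h2 : (pvTakeRun cs).2.tail.length = (pvTakeRun cs).2.length - 1 := List.length_tail
      simp only [List.length_cons]; omega
    · have h1 := pvTakeRun_len cs
      simp only [List.length_cons]; omega

-- Source B's classification of one chunk
def pvClassify (t : String) : String × String :=
  if PySem.Str.endswith t ">" then ("tag", t) else ("text", PySem.Str.strip t)

def split_text_into_parts_alt (text : String) : List (String × String) :=
  (pvTokenize text.toList).map pvClassify

-- ===== PRECONDITION & SPEC =====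
def Spec_split_text_into_parts (text : String) (out : List (String × String)) : Prop := out = split_text_into_parts_alt text
instance (text : String) (out : List (String × String)) : Decidable (Spec_split_text_into_parts text out) := by unfold Spec_split_text_into_parts; infer_instance

-- ===== CLAIM (what is proved, stated in full; the proofs are below) =====
def Claim_equal_split_text_into_parts : Prop := ∀ (text : String), Dom_split_text_into_parts text → Spec_split_text_into_parts text (split_text_into_parts text)

-- ===== LEMMAS AND PROOFS =====

-- characterization of A's scan from an arbitrary pending chunk `temp`
def pvF (temp : List Char) : List Char → List (String × String)
  | [] => if temp ≠ [] then [("text", PySem.Str.strip (String.ofList temp))] else []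
  | c :: r =>
    if c = '<' then
      (if temp ≠ [] then [("text", PySem.Str.strip (String.ofList temp))] else []) ++ pvF ['<'] r
    else if c = '>' then
      ("tag", String.ofList (temp ++ ['>'])) :: pvF [] r
    else
      pvF (temp ++ [c]) r

-- continuation of Source B's tokenizer with a pending (nonempty) chunk `temp`
def pvTokCont (temp : List Char) (r : List Char) : List String :=
  let p := pvTakeRun r
  if p.2.head? = some '>' then
    String.ofList (temp ++ p.1 ++ ['>']) :: pvTokenize p.2.tail
  else
    String.ofList (temp ++ p.1) :: pvTokenize p.2

theorem pvF_foldl (r : List Char) : ∀ (parts : List (String × String)) (temp : String) (b : Bool),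
    (let fin := List.foldl pvStepA (parts, temp, b) r;
     if fin.2.1 ≠ "" then fin.1 ++ [("text", PySem.Str.strip fin.2.1)] else fin.1)
      = parts ++ pvF temp.toList r := by
  induction r with
  | nil =>
    intro parts temp b
    simp only [List.foldl_nil, pvF]
    by_cases h : temp = ""
    · subst h; simp
    · have : temp.toList ≠ [] := by simpa [String.toList_eq_nil_iff] using h
      simp [h, this, String.ofList_toList]
  | cons c r ih =>
    intro parts temp b
    simp only [List.foldl_cons]
    by_cases hlt : c = '<'
    · subst hlt
      by_cases h : temp = ""
      · subst h
        simp only [pvStepA]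
        rw [ih]
        simp [pvF]
      · have hne : temp.toList ≠ [] := by simpa [String.toList_eq_nil_iff] using h
        simp only [pvStepA, if_pos h, ne_eq]
        rw [ih]
        simp [pvF, hne, String.ofList_toList]
    · by_cases hgt : c = '>'
      · subst hgt
        simp only [pvStepA, if_neg hlt]
        rw [ih]
        have : (temp.push '>') = String.ofList (temp.toList ++ ['>']) := by
          apply String.toList_inj.mp; simp [String.toList_push]
        simp [pvF, hlt, this]
      · simp only [pvStepA, if_neg hlt, if_neg hgt]
        rw [ih]
        simp [pvF, hlt, hgt, String.toList_push]

theorem endswith_gt_of_not_mem {l : List Char} (h : '>' ∉ l) :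
    PySem.Chars.endswith l ['>'] = false := by
  rw [← Bool.not_eq_true, PySem.Chars.endswith_iff]
  intro hs
  exact h (hs.subset (by simp))

theorem endswith_gt_append (l : List Char) :
    PySem.Chars.endswith (l ++ ['>']) ['>'] = true :=
  (PySem.Chars.endswith_iff _ _).mpr (List.suffix_append l ['>'])

theorem pvTokenize_cons {c : Char} (r : List Char) (hc : c ≠ '>') :
    pvTokenize (c :: r) = pvTokCont [c] r := by
  rw [pvTokenize, if_neg hc]
  unfold pvTokCont
  simp

theorem pvTokCont_cons {c : Char} (temp r : List Char) (hlt : c ≠ '<') (hgt : c ≠ '>') :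
    pvTokCont temp (c :: r) = pvTokCont (temp ++ [c]) r := by
  have hc : ¬(c = '<' ∨ c = '>') := by tauto
  simp only [pvTokCont, pvTakeRun, hc, if_false]
  simp

theorem pvF_tok (r : List Char) : ∀ (temp : List Char), '>' ∉ temp →
    pvF temp r = (if temp = [] then pvTokenize r else pvTokCont temp r).map pvClassify := by
  induction r with
  | nil =>
    intro temp hmem
    by_cases h : temp = []
    · subst h; simp [pvF, pvTokenize]
    · simp only [pvF, ne_eq, h, not_false_iff, if_true]
      simp [pvTokCont, pvTakeRun, pvTokenize, pvClassify, endswith_gt_of_not_mem hmem]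
  | cons c r ih =>
    intro temp hmem
    by_cases hlt : c = '<'
    · subst hlt
      have hrec := ih ['<'] (by simp)
      simp only [if_neg (by simp : ¬(['<'] : List Char) = [])] at hrec
      by_cases h : temp = []
      · subst h
        simp only [pvF]
        rw [hrec, pvTokenize_cons r (by decide)]
        simp
      · simp only [pvF, ne_eq, h, not_false_iff, if_true]
        have hcont : pvTokCont temp ('<' :: r) = String.ofList temp :: pvTokenize ('<' :: r) := by
          simp [pvTokCont, pvTakeRun]
        rw [hcont, pvTokenize_cons r (by decide), hrec]
        simp [pvClassify, endswith_gt_of_not_mem hmem]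
    · by_cases hgt : c = '>'
      · subst hgt
        have hrec := ih [] (by simp)
        simp only [if_true] at hrec
        have e1 : PySem.Chars.endswith ['>'] ['>'] = true := by decide
        by_cases h : temp = []
        · subst h
          simp only [pvF, if_neg (by decide : ¬('>' : Char) = '<')]
          rw [hrec, pvTokenize]
          simp [pvClassify, e1, (by decide : (">" : String) = String.ofList ['>'])]
        · simp only [pvF, if_neg (by decide : ¬('>' : Char) = '<'), if_neg h]
          have hcont : pvTokCont temp ('>' :: r) = String.ofList (temp ++ ['>']) :: pvTokenize r := by
            simp [pvTokCont, pvTakeRun]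
          rw [hcont, hrec]
          simp [pvClassify, endswith_gt_append temp]
      · have hne : temp ++ [c] ≠ [] := by simp
        have hrec := ih (temp ++ [c]) (by simp [hmem]; exact fun h => hgt h.symm)
        simp only [if_neg hne] at hrec
        simp only [pvF, if_neg hlt, if_neg hgt]
        rw [hrec]
        by_cases h : temp = []
        · subst h
          rw [if_pos rfl, pvTokenize_cons r hgt]
          simp
        · rw [if_neg h, pvTokCont_cons temp r hlt hgt]

-- ===== VERDICT (by name: the statement is the Claim_ definition above) =====
theorem split_text_into_parts_spec : Claim_equal_split_text_into_parts := by
  intro text _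
  unfold Spec_split_text_into_parts split_text_into_parts split_text_into_parts_alt
  rw [pvF_foldl text.toList [] "" false]
  have h := pvF_tok text.toList ([] : List Char) (by simp)
  simp only [if_true] at h
  simpa using h
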